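-- pv_equiv track=rewrite | github.com/aqemery/advent-of-code | 2022/17.py | shiftRock
-- ===== SOURCE A (Python) =====
-- def shiftRock(rock, j):
--     nr = []
--     for x, y in rock:
--         nx = x + j
--         if nx < 0 or nx > 6:
--             return rock
--         nr.append((nx, y))
--     return nr
-- ===== SOURCE B (Python) =====
-- def shiftRock(rock, j):
--     # Aggregate-bounds check: the whole rock stays inside the chamber iff its
--     # leftmost cell shifted is >= 0 and its rightmost cell shifted is <= 6,
--     # so one min/max over the x-coordinates decides legality for all cells.
--     if not rock:
--         return []
--     xs = [x for x, _ in rock]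
--     if -j <= min(xs) and max(xs) <= 6 - j:
--         return [(x + j, y) for x, y in rock]
--     return rock
-- ===== Notes on version B (the rewrite author's own statement) =====
-- stated objective: alternative
-- what changed: Instead of validating each shifted cell inside the build loop with an early abort, B reduces the x-coordinates to their min and max and decides legality of the whole shift with two comparisons against the chamber walls, then maps the shift in one pass.
import Mathlib
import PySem

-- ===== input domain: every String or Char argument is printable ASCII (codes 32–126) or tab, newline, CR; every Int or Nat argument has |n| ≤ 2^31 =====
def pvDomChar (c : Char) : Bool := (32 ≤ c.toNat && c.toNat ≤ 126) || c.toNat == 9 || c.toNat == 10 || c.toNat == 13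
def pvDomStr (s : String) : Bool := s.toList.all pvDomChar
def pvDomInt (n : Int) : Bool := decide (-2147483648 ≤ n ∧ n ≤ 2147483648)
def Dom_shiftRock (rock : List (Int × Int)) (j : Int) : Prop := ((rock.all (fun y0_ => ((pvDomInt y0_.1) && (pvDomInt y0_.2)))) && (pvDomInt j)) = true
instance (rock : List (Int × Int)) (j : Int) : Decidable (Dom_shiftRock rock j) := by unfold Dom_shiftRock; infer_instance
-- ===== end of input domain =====

-- B decides legality of the shift from the min/max of the x-coordinates (two comparisons
-- against the walls) and then maps the shift, instead of A's build loop with early abort.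

-- ===== PORT A =====
-- literal port of A's loop: accumulate nr; on the first out-of-bounds nx return the original rock
def shiftRockGo (orig : List (Int × Int)) (j : Int) : List (Int × Int) → List (Int × Int) → List (Int × Int)
  | [], nr => nr
  | (x, y) :: rest, nr =>
      let nx := x + j
      if nx < 0 ∨ nx > 6 then orig
      else shiftRockGo orig j rest (nr ++ [(nx, y)])

def shiftRock (rock : List (Int × Int)) (j : Int) : List (Int × Int) :=
  shiftRockGo rock j rock []

-- ===== PORT B =====
def shiftRock_alt (rock : List (Int × Int)) (j : Int) : List (Int × Int) :=
  match rock with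
  | [] => []
  | _ =>
    let xs := rock.map (fun p => p.1)
    match PySem.List.min? xs (fun x => x), PySem.List.max? xs (fun x => x) with
    | some lo, some hi =>
        if -j ≤ lo ∧ hi ≤ 6 - j then rock.map (fun p => (p.1 + j, p.2)) else rock
    | _, _ => rock   -- unreachable: xs is nonempty here

-- ===== PRECONDITION & SPEC =====
def Spec_shiftRock (rock : List (Int × Int)) (j : Int) (out : List (Int × Int)) : Prop := out = shiftRock_alt rock j
instance (rock : List (Int × Int)) (j : Int) (out : List (Int × Int)) : Decidable (Spec_shiftRock rock j out) := by unfold Spec_shiftRock; infer_instance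

-- ===== CLAIM (what is proved, stated in full; the proofs are below) =====
def Claim_equal_shiftRock : Prop := ∀ (rock : List (Int × Int)) (j : Int), Dom_shiftRock rock j → Spec_shiftRock rock j (shiftRock rock j)

-- ===== LEMMAS AND PROOFS =====
-- A's loop equals: if every shifted x is in bounds, append the mapped list; else return orig.
theorem shiftRockGo_eq (orig : List (Int × Int)) (j : Int) :
    ∀ (l nr : List (Int × Int)),
      shiftRockGo orig j l nr =
        if l.all (fun p => 0 ≤ p.1 + j ∧ p.1 + j ≤ 6) then
          nr ++ l.map (fun p => (p.1 + j, p.2))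
        else orig := by
  intro l
  induction l with
  | nil => intro nr; simp [shiftRockGo]
  | cons hd rest ih =>
    intro nr
    obtain ⟨x, y⟩ := hd
    simp only [shiftRockGo, List.all_cons, List.map_cons]
    by_cases h : x + j < 0 ∨ x + j > 6
    · rw [if_pos h]
      have : ¬ (0 ≤ x + j ∧ x + j ≤ 6) := by omega
      simp [this]
    · rw [if_neg h]
      rw [ih]
      have h0 : decide (0 ≤ x + j ∧ x + j ≤ 6) = true := by
        simp only [decide_eq_true_eq]; omega
      rw [h0, Bool.true_and, List.append_assoc, List.singleton_append]

-- the per-element bound holds for all elements iff it holds at the extremes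
theorem all_iff_minmax (rock : List (Int × Int)) (j lo hi : Int)
    (hlo : PySem.List.min? (rock.map (fun p => p.1)) (fun x => x) = some lo)
    (hhi : PySem.List.max? (rock.map (fun p => p.1)) (fun x => x) = some hi) :
    (rock.all (fun p => 0 ≤ p.1 + j ∧ p.1 + j ≤ 6) = true) ↔ (-j ≤ lo ∧ hi ≤ 6 - j) := by
  constructor
  · intro h
    have hlom := PySem.List.min?_mem hlo
    have hhim := PySem.List.max?_mem hhi
    simp only [List.mem_map] at hlom hhim
    obtain ⟨pl, hpl, hpl2⟩ := hlom
    obtain ⟨ph, hph, hph2⟩ := hhim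
    rw [List.all_eq_true] at h
    have h1 := h pl hpl
    have h2 := h ph hph
    simp only [decide_eq_true_eq] at h1 h2
    omega
  · intro ⟨h1, h2⟩
    rw [List.all_eq_true]
    intro p hp
    have hx : p.1 ∈ rock.map (fun p => p.1) := List.mem_map_of_mem hp
    have hmin := PySem.List.min?_isMin hlo p.1 hx
    have hmax := PySem.List.max?_isMax hhi p.1 hx
    simp only [decide_eq_true_eq]
    omega

-- ===== VERDICT (by name: the statement is the Claim_ definition above) =====
theorem shiftRock_spec : Claim_equal_shiftRock := by
  intro rock j _
  unfold Spec_shiftRock shiftRock shiftRock_alt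
  rw [shiftRockGo_eq]
  match rock with
  | [] => simp
  | p :: rest =>
    simp only
    cases hlo : PySem.List.min? ((p :: rest).map (fun q => q.1)) (fun x => x) with
    | none => simp [PySem.List.min?_eq_none_iff] at hlo
    | some lo =>
      cases hhi : PySem.List.max? ((p :: rest).map (fun q => q.1)) (fun x => x) with
      | none => simp [PySem.List.max?_eq_none_iff] at hhi
      | some hi =>
        have := all_iff_minmax (p :: rest) j lo hi hlo hhi
        by_cases hc : -j ≤ lo ∧ hi ≤ 6 - j
        · rw [if_pos (this.mpr hc)]; simp [hc]
        · have hna : ¬ ((p :: rest).all (fun q => 0 ≤ q.1 + j ∧ q.1 + j ≤ 6) = true) := fun h => hc (this.mp h)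
          rw [if_neg hna]; simp [hc]
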